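-- pv_equiv track=rewrite | github.com/Real1243/Investigen_Internship_Work | backend/services/signalHireAPI.py | get_seniority_rank
-- ===== SOURCE A (Python) =====
-- def get_seniority_rank(title):
--     if not title:
--         return 999
--     title_lower = title.lower()
--     if any(w in title_lower for w in ['chief', 'cfo', 'chief financial', 'chief treasury']):
--         return 1
--     if any(w in title_lower for w in ['vp', 'vice president', 'svp', 'evp']):
--         return 2
--     if any(w in title_lower for w in ['director', 'head of', 'group head']):
--         return 3
--     if any(w in title_lower for w in ['senior manager', 'lead', 'principal']):
--         return 4
--     if any(w in title_lower for w in ['manager']):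
--         return 5
--     return 6
-- ===== SOURCE B (Python) =====
-- SENIORITY_TABLE = [
--     (1, 'chief'), (1, 'cfo'), (1, 'chief financial'), (1, 'chief treasury'),
--     (2, 'vp'), (2, 'vice president'), (2, 'svp'), (2, 'evp'),
--     (3, 'director'), (3, 'head of'), (3, 'group head'),
--     (4, 'senior manager'), (4, 'lead'), (4, 'principal'),
--     (5, 'manager'),
-- ]
--
-- def get_seniority_rank(title):
--     if not title:
--         return 999
--     title_lower = title.lower()
--     best = 6
--     for rank, kw in SENIORITY_TABLE:
--         if kw in title_lower:
--             best = min(best, rank)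
--     return best
-- ===== Notes on version B (the rewrite author's own statement) =====
-- stated objective: simpler
-- what changed: Replaced the five hard-coded any()-cascade branches with a single ordered (rank, keyword) table and one minimum-rank pass over it (first matching tier equals minimum matched rank since ranks ascend).
import Mathlib
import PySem

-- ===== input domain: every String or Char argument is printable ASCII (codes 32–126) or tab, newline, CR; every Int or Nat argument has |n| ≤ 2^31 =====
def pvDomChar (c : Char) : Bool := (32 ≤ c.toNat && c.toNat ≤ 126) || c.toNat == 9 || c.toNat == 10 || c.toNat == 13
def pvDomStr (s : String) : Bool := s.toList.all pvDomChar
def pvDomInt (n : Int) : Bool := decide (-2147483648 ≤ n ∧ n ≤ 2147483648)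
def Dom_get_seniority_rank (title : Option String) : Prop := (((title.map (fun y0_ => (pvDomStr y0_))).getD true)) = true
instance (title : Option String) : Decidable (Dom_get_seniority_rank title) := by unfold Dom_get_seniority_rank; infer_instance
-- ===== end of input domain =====

-- B replaces A's five hard-coded `any(...)` cascades with one ordered (rank, keyword) table
-- and a single minimum-rank fold over it (objective: simpler, data-driven; same cost).

-- ===== PORT A =====
def get_seniority_rank (title : Option String) : Int :=
  match title with
  | none => 999
  | some t =>
    if t = "" then 999
    else
      let title_lower := PySem.Str.lower t
      if ["chief", "cfo", "chief financial", "chief treasury"].any (fun w => PySem.Str.isIn w title_lower) then 1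
      else if ["vp", "vice president", "svp", "evp"].any (fun w => PySem.Str.isIn w title_lower) then 2
      else if ["director", "head of", "group head"].any (fun w => PySem.Str.isIn w title_lower) then 3
      else if ["senior manager", "lead", "principal"].any (fun w => PySem.Str.isIn w title_lower) then 4
      else if ["manager"].any (fun w => PySem.Str.isIn w title_lower) then 5
      else 6

-- ===== PORT B =====
def seniorityTable : List (Int × String) :=
  [(1, "chief"), (1, "cfo"), (1, "chief financial"), (1, "chief treasury"),
   (2, "vp"), (2, "vice president"), (2, "svp"), (2, "evp"),
   (3, "director"), (3, "head of"), (3, "group head"),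
   (4, "senior manager"), (4, "lead"), (4, "principal"),
   (5, "manager")]

def get_seniority_rank_alt (title : Option String) : Int :=
  match title with
  | none => 999
  | some t =>
    if t = "" then 999
    else
      let title_lower := PySem.Str.lower t
      seniorityTable.foldl
        (fun best p => if PySem.Str.isIn p.2 title_lower then min best p.1 else best) 6

-- ===== PRECONDITION & SPEC =====
def Spec_get_seniority_rank (title : Option String) (out : Int) : Prop := out = get_seniority_rank_alt title
instance (title : Option String) (out : Int) : Decidable (Spec_get_seniority_rank title out) := by unfold Spec_get_seniority_rank; infer_instance

-- ===== CLAIM (what is proved, stated in full; the proofs are below) =====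
def Claim_equal_get_seniority_rank : Prop := ∀ (title : Option String), Dom_get_seniority_rank title → Spec_get_seniority_rank title (get_seniority_rank title)

-- ===== LEMMAS AND PROOFS =====

-- A group in which no keyword matches leaves the accumulator unchanged.
theorem foldl_step_no_match (m : String → Bool) (g : List (Int × String)) (acc : Int)
    (h : ∀ p ∈ g, m p.2 = false) :
    g.foldl (fun best p => if m p.2 then min best p.1 else best) acc = acc := by
  induction g generalizing acc with
  | nil => rfl
  | cons p g ih =>
    rw [List.foldl_cons, if_neg (by simp [h p List.mem_cons_self])]
    exact ih acc (fun q hq => h q (List.mem_cons_of_mem _ hq))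

-- A group whose ranks are all ≥ the accumulator leaves it unchanged.
theorem foldl_step_ge (m : String → Bool) (g : List (Int × String)) (acc : Int)
    (h : ∀ p ∈ g, acc ≤ p.1) :
    g.foldl (fun best p => if m p.2 then min best p.1 else best) acc = acc := by
  induction g generalizing acc with
  | nil => rfl
  | cons p g ih =>
    simp only [List.foldl_cons]
    have hmin : min acc p.1 = acc := min_eq_left (h p (List.mem_cons_self))
    have : (if m p.2 then min acc p.1 else acc) = acc := by split <;> simp [hmin]
    rw [this]
    exact ih acc (fun q hq => h q (List.mem_cons_of_mem _ hq))

-- A constant-rank group with at least one match drives the accumulator to that rank (when r ≤ acc).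
theorem foldl_step_match (m : String → Bool) (g : List (Int × String)) (acc r : Int)
    (hex : ∃ p ∈ g, m p.2 = true) (hall : ∀ p ∈ g, p.1 = r) (hr : r ≤ acc) :
    g.foldl (fun best p => if m p.2 then min best p.1 else best) acc = r := by
  induction g generalizing acc with
  | nil => exact absurd hex (by simp)
  | cons p g ih =>
    simp only [List.foldl_cons]
    by_cases hp : m p.2 = true
    · rw [if_pos hp, hall p (List.mem_cons_self), min_eq_right hr]
      by_cases hg : ∃ q ∈ g, m q.2 = true
      · exact ih r hg (fun q hq => hall q (List.mem_cons_of_mem _ hq)) le_rfl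
      · exact foldl_step_ge m g r (fun q hq => le_of_eq (hall q (List.mem_cons_of_mem _ hq)).symm)
    · rw [if_neg hp]
      have hex' : ∃ q ∈ g, m q.2 = true := by
        rcases hex with ⟨q, hq, hmq⟩
        rcases List.mem_cons.mp hq with rfl | hq'
        · exact absurd hmq hp
        · exact ⟨q, hq', hmq⟩
      exact ih acc hex' (fun q hq => hall q (List.mem_cons_of_mem _ hq)) hr

theorem cascade_eq_fold (t : String) :
    (if ["chief", "cfo", "chief financial", "chief treasury"].any (fun w => PySem.Str.isIn w t) then (1:Int)
     else if ["vp", "vice president", "svp", "evp"].any (fun w => PySem.Str.isIn w t) then 2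
     else if ["director", "head of", "group head"].any (fun w => PySem.Str.isIn w t) then 3
     else if ["senior manager", "lead", "principal"].any (fun w => PySem.Str.isIn w t) then 4
     else if ["manager"].any (fun w => PySem.Str.isIn w t) then 5
     else 6)
    = seniorityTable.foldl
        (fun best p => if PySem.Str.isIn p.2 t then min best p.1 else best) 6 := by
  set m : String → Bool := fun w => PySem.Str.isIn w t with hm
  have htab : seniorityTable =
      [((1:Int), "chief"), (1, "cfo"), (1, "chief financial"), (1, "chief treasury")] ++
      [(2, "vp"), (2, "vice president"), (2, "svp"), (2, "evp")] ++
      [(3, "director"), (3, "head of"), (3, "group head")] ++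
      [(4, "senior manager"), (4, "lead"), (4, "principal")] ++
      [(5, "manager")] := rfl
  rw [htab]
  have step_eq : (fun (best : Int) (p : Int × String) => if PySem.Str.isIn p.2 t then min best p.1 else best)
      = (fun best p => if m p.2 then min best p.1 else best) := rfl
  rw [step_eq]
  simp only [List.foldl_append]
  by_cases h1 : ["chief", "cfo", "chief financial", "chief treasury"].any m
  · rw [if_pos h1]
    rw [foldl_step_match m _ 6 1 (by simpa [List.any_eq_true] using h1) (by simp) (by norm_num)]
    rw [foldl_step_ge m _ 1 (by norm_num), foldl_step_ge m _ 1 (by norm_num),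
        foldl_step_ge m _ 1 (by norm_num), foldl_step_ge m _ 1 (by norm_num)]
  · rw [if_neg h1, foldl_step_no_match m _ 6 (by simpa [List.any_eq_true, not_or] using h1)]
    by_cases h2 : ["vp", "vice president", "svp", "evp"].any m
    · rw [if_pos h2]
      rw [foldl_step_match m _ 6 2 (by simpa [List.any_eq_true] using h2) (by simp) (by norm_num)]
      rw [foldl_step_ge m _ 2 (by norm_num), foldl_step_ge m _ 2 (by norm_num),
          foldl_step_ge m _ 2 (by norm_num)]
    · rw [if_neg h2, foldl_step_no_match m _ 6 (by simpa [List.any_eq_true, not_or] using h2)]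
      by_cases h3 : ["director", "head of", "group head"].any m
      · rw [if_pos h3]
        rw [foldl_step_match m _ 6 3 (by simpa [List.any_eq_true] using h3) (by simp) (by norm_num)]
        rw [foldl_step_ge m _ 3 (by norm_num), foldl_step_ge m _ 3 (by norm_num)]
      · rw [if_neg h3, foldl_step_no_match m _ 6 (by simpa [List.any_eq_true, not_or] using h3)]
        by_cases h4 : ["senior manager", "lead", "principal"].any m
        · rw [if_pos h4]
          rw [foldl_step_match m _ 6 4 (by simpa [List.any_eq_true] using h4) (by simp) (by norm_num)]
          rw [foldl_step_ge m _ 4 (by norm_num)]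
        · rw [if_neg h4, foldl_step_no_match m _ 6 (by simpa [List.any_eq_true, not_or] using h4)]
          by_cases h5 : ["manager"].any m
          · rw [if_pos h5]
            exact (foldl_step_match m _ 6 5 (by simpa [List.any_eq_true] using h5) (by simp) (by norm_num)).symm
          · rw [if_neg h5, foldl_step_no_match m _ 6 (by simpa [List.any_eq_true, not_or] using h5)]

-- ===== VERDICT (by name: the statement is the Claim_ definition above) =====
theorem get_seniority_rank_spec : Claim_equal_get_seniority_rank := by
  intro title _
  unfold Spec_get_seniority_rank get_seniority_rank get_seniority_rank_alt
  cases title with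
  | none => rfl
  | some t =>
    by_cases h : t = ""
    · simp [h]
    · simp only [if_neg h]
      exact cascade_eq_fold (PySem.Str.lower t)
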